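-- pv_equiv track=rewrite | github.com/jithyan/postgraduate-projects | Distributed and Parallel Algorithms for Big Data/asg1final/task3.py | redistribute_data
-- ===== SOURCE A (Python) =====
-- def flatten_list(nested_list):
--     """
--         Un-nests a nested list.
--     """
--     flattened_list = []
--
--     for sublist in nested_list:
--         if sublist:
--             for item in sublist:
--                 flattened_list.append(item)
--
--     return flattened_list
--
-- def redistribute_data(processors):
--     new_distribution = {}
--
--     for processor_id in range(4):
--         for pid, partition in processors[processor_id].items():
--             if pid not in new_distribution:
--                 new_distribution[pid] = [partition]
--             else:
--                 new_distribution[pid].append(partition)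
--
--     for pid, partition in new_distribution.items():
--         new_distribution[pid] = flatten_list(new_distribution[pid])
--
--     return new_distribution
-- ===== SOURCE B (Python) =====
-- def redistribute_data(processors):
--     new_distribution = {}
--
--     for processor_id in range(4):
--         for pid, partition in processors[processor_id].items():
--             new_distribution.setdefault(pid, [])
--             if partition:
--                 new_distribution[pid].extend(partition)
--
--     return new_distribution
-- ===== Notes on version B (the rewrite author's own statement) =====
-- stated objective: simpler
-- what changed: B replaces A's two-phase strategy (build a dict of lists-of-partitions per pid, then a second pass flattening each with a helper) by a single pass that keeps one flat list per pid via setdefault + extend, dropping flatten_list and the second loop.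
import Mathlib
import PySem

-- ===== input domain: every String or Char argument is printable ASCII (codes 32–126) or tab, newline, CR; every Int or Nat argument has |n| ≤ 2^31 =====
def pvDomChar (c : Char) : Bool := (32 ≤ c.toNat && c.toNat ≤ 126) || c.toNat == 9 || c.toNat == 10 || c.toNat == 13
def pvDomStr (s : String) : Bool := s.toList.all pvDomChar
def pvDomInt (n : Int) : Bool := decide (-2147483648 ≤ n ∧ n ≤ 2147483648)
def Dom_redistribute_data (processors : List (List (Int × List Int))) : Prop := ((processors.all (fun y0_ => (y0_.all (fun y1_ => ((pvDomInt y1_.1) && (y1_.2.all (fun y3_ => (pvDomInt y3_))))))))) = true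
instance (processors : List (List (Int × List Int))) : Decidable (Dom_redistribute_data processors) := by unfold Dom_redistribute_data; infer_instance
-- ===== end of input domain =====

-- B merges the two phases of A into one pass: it keeps ONE flat list per pid (setdefault + extend)
-- instead of A's list-of-partitions per pid followed by a flatten pass; objective: simpler.

-- ===== PORT A =====
def flatten_list (nested_list : List (List Int)) : List Int :=
  nested_list.foldl
    (fun flattened sublist =>
      if sublist ≠ [] then sublist.foldl (fun acc item => acc ++ [item]) flattened
      else flattened)
    []

def redistribute_data (processors : List (List (Int × List Int))) : List (Int × List Int) :=
  let d : PySem.Dict Int (List (List Int)) :=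
    (PySem.List.pyRange 0 4 1).foldl
      (fun d processor_id =>
        (PySem.List.pyGetD processors processor_id []).foldl
          (fun d p =>
            if d.contains p.1 = false then d.insert p.1 [p.2]
            else d.modify p.1 [] (fun l => l ++ [p.2]))
          d)
      PySem.Dict.empty
  -- Python reassigns d[pid] in place; the values change type (list-of-lists -> flat list), so the
  -- in-place pass is ported by rebuilding the dict in items order (exact: keys are distinct, order kept)
  let d2 := d.items.foldl (fun d' p => d'.insert p.1 (flatten_list p.2))
              (PySem.Dict.empty : PySem.Dict Int (List Int))
  d2.items

-- ===== PORT B =====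
def redistribute_data_alt (processors : List (List (Int × List Int))) : List (Int × List Int) :=
  ((PySem.List.pyRange 0 4 1).foldl
      (fun d processor_id =>
        (PySem.List.pyGetD processors processor_id []).foldl
          (fun d p =>
            let d' := d.setdefault p.1 []
            if p.2 ≠ [] then d'.modify p.1 [] (fun l => l ++ p.2) else d')
          d)
      (PySem.Dict.empty : PySem.Dict Int (List Int))).items

-- ===== PRECONDITION & SPEC =====
-- Pre_ excludes exactly the inputs on which A raises IndexError: processors[0..3] are read unconditionally.
def Pre_redistribute_data (processors : List (List (Int × List Int))) : Prop :=
  4 ≤ processors.length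
instance (processors : List (List (Int × List Int))) : Decidable (Pre_redistribute_data processors) := by
  unfold Pre_redistribute_data; infer_instance

def pvWitness_redistribute_data : (List (List (Int × List Int))) :=
  [[(1, [10, 20])], [(2, [])], [(1, [30])], []]

def Spec_redistribute_data (processors : List (List (Int × List Int))) (out : List (Int × List Int)) : Prop := out = redistribute_data_alt processors
instance (processors : List (List (Int × List Int))) (out : List (Int × List Int)) : Decidable (Spec_redistribute_data processors out) := by unfold Spec_redistribute_data; infer_instance

-- ===== CLAIM (what is proved, stated in full; the proofs are below) =====
def Claim_equal_redistribute_data : Prop := ∀ (processors : List (List (Int × List Int))), Dom_redistribute_data processors → Pre_redistribute_data processors → Spec_redistribute_data processors (redistribute_data processors)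

-- ===== LEMMAS AND PROOFS =====

-- value translation: an entry of A's phase-1 dict corresponds to its flattened entry in B's dict
def fpair (p : Int × List (List Int)) : Int × List Int := (p.1, flatten_list p.2)

-- the per-pair loop bodies of A's and B's phase-1 loops, as named functions
def stepA (d : PySem.Dict Int (List (List Int))) (p : Int × List Int) : PySem.Dict Int (List (List Int)) :=
  if d.contains p.1 = false then d.insert p.1 [p.2] else d.modify p.1 [] (fun l => l ++ [p.2])

def stepB (d : PySem.Dict Int (List Int)) (p : Int × List Int) : PySem.Dict Int (List Int) :=
  let d' := d.setdefault p.1 []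
  if p.2 ≠ [] then d'.modify p.1 [] (fun l => l ++ p.2) else d'

lemma foldl_app (l : List Int) : ∀ acc : List Int, l.foldl (fun a x => a ++ [x]) acc = acc ++ l := by
  induction l with
  | nil => simp
  | cons x t ih => intro acc; simp only [List.foldl, ih]; simp

lemma flatten_eq (l : List (List Int)) :
    flatten_list l = l.foldl (fun f s => if s ≠ [] then f ++ s else f) [] := by
  unfold flatten_list
  congr 1
  funext f s
  by_cases h : s = []
  · simp [h]
  · rw [if_pos h, if_pos h, foldl_app]

lemma flatten_singleton (x : List Int) : flatten_list [x] = x := by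
  rw [flatten_eq]
  by_cases h : x = [] <;> simp [h]

lemma flatten_append_singleton (l : List (List Int)) (x : List Int) :
    flatten_list (l ++ [x]) = flatten_list l ++ x := by
  rw [flatten_eq, flatten_eq, List.foldl_append]
  by_cases h : x = [] <;> simp [List.foldl, h]

lemma map_fst_fpair (l : List (Int × List (List Int))) :
    (l.map fpair).map Prod.fst = l.map Prod.fst := by
  simp [fpair, Function.comp]

lemma map_fst_replace {α : Type} (k : Int) (v : α) (l : List (Int × α)) :
    (l.map (fun q => if (q.1 == k) = true then (k, v) else q)).map Prod.fst = l.map Prod.fst := by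
  rw [List.map_map]
  refine List.map_congr_left ?_
  intro q _
  by_cases h : q.1 = k <;> simp [h]

-- a non-matching head entry is carried through one step unchanged
lemma stepA_cons (q : Int × List (List Int)) (t : List (Int × List (List Int)))
    (k : Int) (part : List Int) (h : q.1 ≠ k) :
    (stepA (PySem.Dict.mk (q :: t)) (k, part)).items
      = q :: (stepA (PySem.Dict.mk t) (k, part)).items := by
  have hb : (q.1 == k) = false := by simp [h]
  by_cases hc : (t.any fun p => p.1 == k) = true <;>
    simp [stepA, PySem.Dict.contains, PySem.Dict.insert, PySem.Dict.modify,
          PySem.Dict.getD, PySem.Dict.get?, List.any_cons, hb, hc] <;>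
      exact fun e => absurd e h

lemma stepB_cons (q : Int × List Int) (t : List (Int × List Int))
    (k : Int) (part : List Int) (h : q.1 ≠ k) :
    (stepB (PySem.Dict.mk (q :: t)) (k, part)).items
      = q :: (stepB (PySem.Dict.mk t) (k, part)).items := by
  have hb : (q.1 == k) = false := by simp [h]
  by_cases hp : part = [] <;>
    by_cases hc : (t.any fun p => p.1 == k) = true <;>
      simp [stepB, PySem.Dict.contains, PySem.Dict.insert, PySem.Dict.setdefault,
            PySem.Dict.modify, PySem.Dict.getD, PySem.Dict.get?, List.any_cons, hb, hc, hp] <;>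
        exact fun e => absurd e h

-- one pair processed: B's dict stays the fpair-image of A's dict
lemma step_corr (lA : List (Int × List (List Int))) (k : Int) (part : List Int)
    (hnd : (lA.map Prod.fst).Nodup) :
    (stepB (PySem.Dict.mk (lA.map fpair)) (k, part)).items
      = (stepA (PySem.Dict.mk lA) (k, part)).items.map fpair := by
  induction lA with
  | nil =>
    by_cases h : part = [] <;>
      simp [stepA, stepB, PySem.Dict.contains, PySem.Dict.insert, PySem.Dict.setdefault,
            PySem.Dict.modify, PySem.Dict.getD, PySem.Dict.get?, h, fpair, flatten_singleton]
  | cons q t ih =>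
    simp only [List.map_cons, List.nodup_cons] at hnd
    by_cases hqk : q.1 = k
    · -- head matches: both sides replace the head entry, the tail is untouched
      have hnot : k ∉ t.map Prod.fst := hqk ▸ hnd.1
      have hnotf : k ∉ (t.map fpair).map Prod.fst := by rw [map_fst_fpair]; exact hnot
      subst hqk
      by_cases hp : part = [] <;>
        simp [stepA, stepB, PySem.Dict.contains, PySem.Dict.insert, PySem.Dict.setdefault,
              PySem.Dict.modify, PySem.Dict.getD, PySem.Dict.get?, List.any_cons, fpair, hp,
              flatten_append_singleton] <;>
          (intro a b hab
           have hak : a ≠ q.1 := fun e => hnot (e ▸ List.mem_map_of_mem (f := Prod.fst) hab)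
           simp [hak])
    · -- head differs: both sides keep the head and act on the tail
      rw [List.map_cons, stepB_cons (fpair q) (t.map fpair) k part (by simp [fpair]; exact hqk),
          stepA_cons q t k part hqk, List.map_cons, ih hnd.2]

-- keys of A's dict after one step (so Nodup is preserved)
lemma nodup_stepA (lA : List (Int × List (List Int))) (p : Int × List Int)
    (hnd : (lA.map Prod.fst).Nodup) :
    ((stepA (PySem.Dict.mk lA) p).items.map Prod.fst).Nodup := by
  by_cases h : (lA.any fun q => q.1 == p.1) = true
  · simp only [stepA, PySem.Dict.modify]
    rw [if_neg (by simp [PySem.Dict.contains, h])]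
    simp only [PySem.Dict.insert]
    rw [if_pos (by simp [PySem.Dict.contains, h])]
    show ((lA.map fun q => if (q.1 == p.1) = true then (p.1, _) else q).map Prod.fst).Nodup
    rw [map_fst_replace]
    exact hnd
  · have hmem : p.1 ∉ lA.map Prod.fst := by
      simp only [List.any_eq_true, beq_iff_eq] at h
      intro hm
      obtain ⟨q, hq, e⟩ := List.mem_map.mp hm
      exact h ⟨q, hq, e⟩
    simp [stepA, PySem.Dict.contains, PySem.Dict.insert, h, List.nodup_append, hnd]
    exact fun a x hax e => hmem (e ▸ List.mem_map_of_mem (f := Prod.fst) hax)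

-- phase-1 inner loop over one processor's items
lemma fold_corr (l : List (Int × List Int)) : ∀ (lA : List (Int × List (List Int))),
    (lA.map Prod.fst).Nodup →
    (l.foldl stepB (PySem.Dict.mk (lA.map fpair))).items
        = (l.foldl stepA (PySem.Dict.mk lA)).items.map fpair
      ∧ ((l.foldl stepA (PySem.Dict.mk lA)).items.map Prod.fst).Nodup := by
  induction l with
  | nil => intro lA hnd; exact ⟨rfl, hnd⟩
  | cons p t ih =>
    intro lA hnd
    have hstep := step_corr lA p.1 p.2 hnd
    have hnd' := nodup_stepA lA p hnd
    have h2 := ih (stepA (PySem.Dict.mk lA) p).items hnd'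
    rw [← hstep] at h2
    exact h2

-- phase-1 outer loop over the processor ids
lemma outer_corr (is : List Int) (processors : List (List (Int × List Int))) :
    ∀ (lA : List (Int × List (List Int))),
    (lA.map Prod.fst).Nodup →
    (is.foldl (fun d i => (PySem.List.pyGetD processors i []).foldl stepB d)
        (PySem.Dict.mk (lA.map fpair))).items
      = (is.foldl (fun d i => (PySem.List.pyGetD processors i []).foldl stepA d)
          (PySem.Dict.mk lA)).items.map fpair
    ∧ ((is.foldl (fun d i => (PySem.List.pyGetD processors i []).foldl stepA d)
          (PySem.Dict.mk lA)).items.map Prod.fst).Nodup := by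
  induction is with
  | nil => intro lA hnd; exact ⟨rfl, hnd⟩
  | cons i t ih =>
    intro lA hnd
    have h := fold_corr (PySem.List.pyGetD processors i []) lA hnd
    have h2 := ih ((PySem.List.pyGetD processors i []).foldl stepA (PySem.Dict.mk lA)).items h.2
    rw [← h.1] at h2
    exact h2

-- ===== VERDICT (by name: the statement is the Claim_ definition above) =====
theorem redistribute_data_spec : Claim_equal_redistribute_data := by
  intro processors _ _
  unfold Spec_redistribute_data redistribute_data redistribute_data_alt
  have h := outer_corr (PySem.List.pyRange 0 4 1) processors [] (by simp)
  simp only [List.map_nil] at h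
  show ((((PySem.List.pyRange 0 4 1).foldl
      (fun d i => (PySem.List.pyGetD processors i []).foldl stepA d)
      (PySem.Dict.mk [])).items).foldl (fun d' p => d'.insert p.1 (flatten_list p.2))
        (PySem.Dict.empty : PySem.Dict Int (List Int))).items
    = ((PySem.List.pyRange 0 4 1).foldl
        (fun d i => (PySem.List.pyGetD processors i []).foldl stepB d)
        (PySem.Dict.mk [])).items
  set dA := (PySem.List.pyRange 0 4 1).foldl
      (fun d i => (PySem.List.pyGetD processors i []).foldl stepA d) (PySem.Dict.mk []) with hdA
  have h2 := PySem.Dict.items_foldl_insert_fresh (d := (PySem.Dict.empty : PySem.Dict Int (List Int)))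
      (l := dA.items) (k := Prod.fst) (v := fun p => flatten_list p.2)
      (by intro a _; simp [PySem.Dict.contains, PySem.Dict.empty]) h.2
  simp only [PySem.Dict.empty] at h2 ⊢
  rw [h2, h.1]
  rfl
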